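-- pv_equiv track=rewrite | github.com/chanchs/euler | lib/utilities.py | larger_subsets_have_larger_sums
-- ===== SOURCE A (Python) =====
-- def larger_subsets_have_larger_sums(members):
--     """
--     (tuple OR set OR list) -> bool
--
--     Takes members, which is a tuple, set, or list representing the elements of
--     the set for which a power set is desired. The parameter members will
--     henceforth be referred to as a set for convenience. Checks that for any
--     non-empty, disjoint subsets B and C, if B has more elements than C, then
--     sum(B) > sum(C). Returns True if this condition holds. Returns False
--     otherwise.
--
--     This condition is checked by comparing extreme cases: we consider every
--     possible pair of disjoint subset sizes n and n - 1 for 1 < n. For each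
--     pair of sizes we compare the smallest possible sum of a subset of size n
--     to the largest sum of a subset of size n - 1. (We increment n until any
--     further increase in n would imply that the two subsets would not be
--     disjoint. This occurs when n is equal to the integer portion of the length
--     of members divided by two.) If the sums of the subsets of size n are
--     larger than the sums of the subsets of size n - 1 in every case we know
--     that the condition holds and we return True. If any sum of the subset of
--     size n - 1 is larger than the associated sum of the subset of size n then
--     we have proven that there is at least pair of sizes for which the
--     condition does not hold and we return False.
--
--     For example, if members contains 7 elements we compare the sums of these
--     pairs of subsets:
--         i. The smallest-sum subset of size 2 vs. the largest-sum
--             subset of size 1;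
--         ii. The smallest-sum subset of size 3 vs. the largest-sum
--             subset of size 2;
--         iii. The smallest-sum subset of size 4 vs. the largest-sum
--             subset of size 3.
--
--     :param members:
--     :return:
--     """
--     members_count = len(members)
--     sorted_members = sorted(members)  # Sorted to make indexing easier.
--     smallest_n_sum = sorted_members[0]  # Smallest sum of an n-member subset.
--     largest_n_minus_one_sum = 0  # Largest sum of an (n - 1)-member subset.
--
--     # Compares all n and n - 1 disjoint subset size pairs:
--     for index in range(members_count // 2):
--         # Adds next-largest item to smallest_n_sum:
--         smallest_n_sum += sorted_members[index + 1]
--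
--         # Adds next-smallest item to largest_n_minus_one_sum:
--         largest_n_minus_one_sum += sorted_members[members_count - index - 1]
--
--         # Condition fails if any smaller subset doesn't have a smaller sum:
--         if smallest_n_sum <= largest_n_minus_one_sum:
--             return False
--
--     # Returns True if both conditions hold:
--     return True
-- ===== SOURCE B (Python) =====
-- def larger_subsets_have_larger_sums(members):
--     s = sorted(members)
--     n = len(s)
--     prefix = [0]
--     for x in s:
--         prefix.append(prefix[-1] + x)
--     total = prefix[n]
--     # smallest sum of a (k+2)-subset is prefix[k+2]; largest sum of a
--     # (k+1)-subset is total - prefix[n-k-1]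
--     return all(prefix[k + 2] > total - prefix[n - k - 1] for k in range(n // 2))
-- ===== Notes on version B (the rewrite author's own statement) =====
-- stated objective: alternative
-- what changed: Replaces A's fused loop carrying two running scalar sums and an early return by a precomputed prefix-sum table over the sorted list plus a single all() over table lookups comparing smallest (k+2)-subset sums with largest (k+1)-subset sums.
import Mathlib
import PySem

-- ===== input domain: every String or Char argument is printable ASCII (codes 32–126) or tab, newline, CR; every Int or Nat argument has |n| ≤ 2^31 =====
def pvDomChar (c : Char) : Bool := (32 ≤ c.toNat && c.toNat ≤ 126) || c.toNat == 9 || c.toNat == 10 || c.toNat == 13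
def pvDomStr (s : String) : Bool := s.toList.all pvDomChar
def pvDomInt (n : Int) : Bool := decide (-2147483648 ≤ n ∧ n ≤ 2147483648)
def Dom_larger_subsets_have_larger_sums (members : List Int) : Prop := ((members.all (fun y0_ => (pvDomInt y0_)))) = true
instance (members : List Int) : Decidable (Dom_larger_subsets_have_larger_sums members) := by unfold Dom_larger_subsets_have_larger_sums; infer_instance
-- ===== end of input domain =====

-- B replaces A's fused running-sum loop with early return by a prefix-sum table
-- over the sorted list and a single all() over table lookups (objective: alternative).
-- Pre_ excludes the empty list, on which A raises IndexError.


-- ===== PORT A =====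
-- A's for-loop with two running sums and early `return False`
def pvALoop (s : List Int) (n : Int) : List Int → Int → Int → Bool
  | [], _, _ => true
  | idx :: rest, sns, lnm =>
    let sns' := sns + (PySem.List.pyGet? s (idx + 1)).getD 0
    let lnm' := lnm + (PySem.List.pyGet? s (n - idx - 1)).getD 0
    if sns' ≤ lnm' then false else pvALoop s n rest sns' lnm'

def larger_subsets_have_larger_sums (members : List Int) : Bool :=
  let members_count : Int := members.length
  let sorted_members := PySem.List.sorted members (fun x => x) false
  match PySem.List.pyGet? sorted_members 0 with
  | none => false  -- IndexError on empty input; excluded by Pre_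
  | some smallest =>
    pvALoop sorted_members members_count
      (PySem.List.pyRange 0 (PySem.Int.floordiv members_count 2) 1) smallest 0

-- ===== PORT B =====
def larger_subsets_have_larger_sums_alt (members : List Int) : Bool :=
  let s := PySem.List.sorted members (fun x => x) false
  let n : Int := s.length
  let pfx := s.foldl (fun ps x => ps ++ [(PySem.List.pyGet? ps (-1)).getD 0 + x]) [(0 : Int)]
  let total := (PySem.List.pyGet? pfx n).getD 0
  (PySem.List.pyRange 0 (PySem.Int.floordiv n 2) 1).all fun k =>
    decide ((PySem.List.pyGet? pfx (k + 2)).getD 0 > total - (PySem.List.pyGet? pfx (n - k - 1)).getD 0)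

-- ===== PRECONDITION & SPEC =====
-- Pre_ excludes exactly the empty list, on which A raises IndexError.
def Pre_larger_subsets_have_larger_sums (members : List Int) : Prop := members ≠ []
instance (members : List Int) : Decidable (Pre_larger_subsets_have_larger_sums members) := by unfold Pre_larger_subsets_have_larger_sums; infer_instance
def pvWitness_larger_subsets_have_larger_sums : List Int := [1, 2, 3, 4]

def Spec_larger_subsets_have_larger_sums (members : List Int) (out : Bool) : Prop := out = larger_subsets_have_larger_sums_alt members
instance (members : List Int) (out : Bool) : Decidable (Spec_larger_subsets_have_larger_sums members out) := by unfold Spec_larger_subsets_have_larger_sums; infer_instance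

-- ===== CLAIM (what is proved, stated in full; the proofs are below) =====
def Claim_equal_larger_subsets_have_larger_sums : Prop := ∀ (members : List Int), Dom_larger_subsets_have_larger_sums members → Pre_larger_subsets_have_larger_sums members → Spec_larger_subsets_have_larger_sums members (larger_subsets_have_larger_sums members)

-- ===== LEMMAS AND PROOFS =====

def pvPref (a : Int) : List Int → List Int
  | [] => []
  | x :: t => (a + x) :: pvPref (a + x) t

theorem pvPref_eq_map (l : List Int) : ∀ (a : Int),
    pvPref a l = (List.range l.length).map (fun i => a + (l.take (i + 1)).sum) := by
  induction l with
  | nil => intro a; simp [pvPref]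
  | cons x t ih =>
    intro a
    simp only [pvPref, List.length_cons, List.range_succ_eq_map, List.map_cons, List.map_map]
    refine List.cons_eq_cons.mpr ⟨by simp, ?_⟩
    rw [ih (a + x)]
    refine List.map_congr_left ?_
    intro i _
    simp only [Function.comp_apply, Nat.succ_eq_add_one, List.take_succ_cons, List.sum_cons]
    ring

theorem pvFoldl_eq (t : List Int) : ∀ (acc : List Int) (a : Int),
    PySem.List.pyGet? acc (-1) = some a →
    t.foldl (fun ps x => ps ++ [(PySem.List.pyGet? ps (-1)).getD 0 + x]) acc = acc ++ pvPref a t := by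
  induction t with
  | nil => intro acc a _; simp [pvPref]
  | cons x t ih =>
    intro acc a h
    simp only [List.foldl_cons, h, Option.getD_some]
    rw [ih (acc ++ [a + x]) (a + x) (PySem.List.pyGet?_neg_one_append_singleton _ _)]
    simp [pvPref]

theorem pvIdx (s : List Int) (i : Nat) (h : i ≤ s.length) :
    PySem.List.pyGet? (0 :: pvPref 0 s) (i : Int) = some ((s.take i).sum) := by
  rw [PySem.List.pyGet?_natCast]
  cases i with
  | zero => simp
  | succ j =>
    have hj : j < s.length := by omega
    simp [pvPref_eq_map, hj]


theorem pvLoop_eq (s : List Int) (k : Nat) : ∀ (a : Nat), a + k = s.length / 2 →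
    pvALoop s (s.length : Int) (PySem.List.pyRange (a : Int) ((s.length / 2 : Nat) : Int) 1)
      ((s.take (a + 1)).sum) (s.sum - (s.take (s.length - a)).sum)
    = (PySem.List.pyRange (a : Int) ((s.length / 2 : Nat) : Int) 1).all (fun j =>
        decide ((PySem.List.pyGet? (0 :: pvPref 0 s) (j + 2)).getD 0 >
          (PySem.List.pyGet? (0 :: pvPref 0 s) ((s.length : Int))).getD 0 -
          (PySem.List.pyGet? (0 :: pvPref 0 s) ((s.length : Int) - j - 1)).getD 0)) := by
  induction k with
  | zero =>
    intro a ha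
    have h0 : s.length / 2 = a := by omega
    rw [PySem.List.pyRange_one_eq_nil (by exact_mod_cast le_of_eq h0)]
    rfl
  | succ k ih =>
    intro a ha
    have hlen2 : 2 ≤ s.length := by omega
    have ha1 : a + 1 < s.length := by omega
    have hna : s.length - a - 1 < s.length := by omega
    rw [PySem.List.pyRange_one_cons (by exact_mod_cast (by omega : (a:Int) < ((s.length / 2 : Nat) : Int)))]
    have e1 : ((a : Int) + 1) = ((a + 1 : Nat) : Int) := by push_cast; ring
    have e2 : ((s.length : Int) - (a : Int) - 1) = ((s.length - a - 1 : Nat) : Int) := by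
      omega
    have e3 : ((a : Int) + 2) = ((a + 2 : Nat) : Int) := by push_cast; ring
    have hgs1 : (PySem.List.pyGet? s ((a:Int) + 1)).getD 0 = s[a+1] := by
      rw [e1, PySem.List.pyGet?_natCast, List.getElem?_eq_getElem ha1]; rfl
    have hgs2 : (PySem.List.pyGet? s ((s.length : Int) - (a:Int) - 1)).getD 0 = s[s.length - a - 1] := by
      rw [e2, PySem.List.pyGet?_natCast, List.getElem?_eq_getElem hna]; rfl
    have hsum1 : (s.take (a + 1)).sum + s[a+1] = (s.take (a + 1 + 1)).sum :=
      (List.sum_take_succ s (a+1) ha1).symm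
    have hsum2 : (s.sum - (s.take (s.length - a)).sum) + s[s.length - a - 1]
        = s.sum - (s.take (s.length - a - 1)).sum := by
      have h5 := List.sum_take_succ s (s.length - a - 1) hna
      have hx : s.length - a - 1 + 1 = s.length - a := by omega
      rw [hx] at h5
      omega
    have eq12 : a + 2 = a + 1 + 1 := by omega
    have hP1 : (PySem.List.pyGet? (0 :: pvPref 0 s) ((a:Int) + 2)).getD 0 = (s.take (a + 1 + 1)).sum := by
      rw [e3, pvIdx s (a+2) (by omega), eq12]; rfl
    have hP2 : (PySem.List.pyGet? (0 :: pvPref 0 s) ((s.length : Int))).getD 0 = s.sum := by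
      rw [pvIdx s s.length (le_refl _)]; simp
    have hP3 : (PySem.List.pyGet? (0 :: pvPref 0 s) ((s.length : Int) - (a:Int) - 1)).getD 0
        = (s.take (s.length - a - 1)).sum := by
      rw [e2, pvIdx s (s.length - a - 1) (by omega)]; rfl
    have hrec := ih (a + 1) (by omega)
    have hx2 : s.length - (a + 1) = s.length - a - 1 := by omega
    rw [hx2] at hrec
    simp only [pvALoop, List.all_cons, hgs1, hgs2, hP1, hP2, hP3, hsum1, hsum2] at hrec ⊢
    by_cases hc : (s.take (a + 1 + 1)).sum ≤ s.sum - (s.take (s.length - a - 1)).sum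
    · have hnot : ¬ ((s.take (a + 1 + 1)).sum > s.sum - (s.take (s.length - a - 1)).sum) := not_lt.mpr hc
      simp [hc, hnot]
    · have hgt : (s.take (a + 1 + 1)).sum > s.sum - (s.take (s.length - a - 1)).sum := not_le.mp hc
      rw [if_neg hc, e1, hrec]
      simp [hgt]

-- ===== VERDICT (by name: the statement is the Claim_ definition above) =====
theorem larger_subsets_have_larger_sums_spec : Claim_equal_larger_subsets_have_larger_sums := by
  intro members _ hpre
  unfold Spec_larger_subsets_have_larger_sums
  simp only [larger_subsets_have_larger_sums, larger_subsets_have_larger_sums_alt]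
  set s := PySem.List.sorted members (fun x => x) false with hs
  have hlen : members.length = s.length := by rw [hs, PySem.List.length_sorted]
  have hsne : s ≠ [] := by
    rw [hs, Ne, PySem.List.sorted_eq_nil_iff]; exact hpre
  have hn0 : 0 < s.length := List.length_pos_iff.mpr hsne
  have hfd : PySem.Int.floordiv ((members.length : Nat) : Int) 2 = ((members.length / 2 : Nat) : Int) := by
    exact_mod_cast PySem.Int.floordiv_natCast members.length 2
  have hfd2 : PySem.Int.floordiv ((s.length : Nat) : Int) 2 = ((s.length / 2 : Nat) : Int) := by
    exact_mod_cast PySem.Int.floordiv_natCast s.length 2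
  have hget0 : PySem.List.pyGet? s 0 = some s[0] := by
    rw [PySem.List.pyGet?_zero, List.getElem?_eq_getElem hn0]
  have hfold : s.foldl (fun ps x => ps ++ [(PySem.List.pyGet? ps (-1)).getD 0 + x]) [(0 : Int)]
      = 0 :: pvPref 0 s := by
    rw [pvFoldl_eq s [(0 : Int)] 0 (by rfl)]
    rfl
  have h01 : s[0] = (s.take (0 + 1)).sum := by
    have := List.sum_take_succ s 0 hn0
    simpa using this.symm
  have h02 : (0 : Int) = s.sum - (s.take (s.length - 0)).sum := by
    simp [List.take_length]
  rw [hget0, hfold, hlen, hfd2]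
  simp only []
  have L := pvLoop_eq s (s.length / 2) 0 (by omega)
  rw [← h01] at L
  rw [Nat.sub_zero, List.take_length, sub_self, Nat.cast_zero] at L
  exact L
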